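-- pv_equiv track=rewrite | github.com/hahyuning/Coding-test-study | baekjoon/브루트포스/3085 사탕 게임 (못품).py | check
-- ===== SOURCE A (Python) =====
-- def check(a, start_row, end_row, start_col, end_col):
--     n = len(a)
--     ans = 1
--
--     # 가로 방향 확인
--     for i in range(start_row, end_row + 1):
--         cnt = 1
--         for j in range(1, n):
--             if a[i][j] == a[i][j - 1]:
--                 cnt += 1
--             else:
--                 cnt = 1
--             ans = max(ans, cnt)
--
--     # 세로 방향 확인
--     for j in range(start_col, end_col + 1):
--         cnt = 1
--         for i in range(1, n):
--             if a[i][j] == a[i - 1][j]: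
--                 cnt += 1
--             else:
--                 cnt = 1
--             ans = max(ans, cnt)
--     return ans
-- ===== SOURCE B (Python) =====
-- def _longest_run(line):
--     # run extraction: cut positions, then max gap between consecutive boundaries
--     cuts = [k for k in range(1, len(line)) if line[k] != line[k - 1]]
--     bounds = [0] + cuts + [len(line)]
--     return max(e - s for s, e in zip(bounds, bounds[1:]))
--
--
-- def check(a, start_row, end_row, start_col, end_col):
--     n = len(a)
--     if n < 2:
--         return 1
--     ans = 1
--     for i in range(start_row, end_row + 1):
--         ans = max(ans, _longest_run(a[i]))
--     for j in range(start_col, end_col + 1):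
--         ans = max(ans, _longest_run([a[i][j] for i in range(n)]))
--     return ans
-- ===== Notes on version B (the rewrite author's own statement) =====
-- stated objective: alternative
-- what changed: Replaces the scalar reset-counter scans with run extraction: a helper materializes the cut positions (indices where adjacent cells differ) of each row/column, forms the boundary list, and takes the max gap between consecutive boundaries; an n<2 guard replaces the empty inner loops.
-- outside the precondition, e.g. on check([['X', 'X', 'X'], ['Y', 'Z', 'Q']], 0, 1, 0, 1): A returns 2, B returns 3
import Mathlib
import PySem

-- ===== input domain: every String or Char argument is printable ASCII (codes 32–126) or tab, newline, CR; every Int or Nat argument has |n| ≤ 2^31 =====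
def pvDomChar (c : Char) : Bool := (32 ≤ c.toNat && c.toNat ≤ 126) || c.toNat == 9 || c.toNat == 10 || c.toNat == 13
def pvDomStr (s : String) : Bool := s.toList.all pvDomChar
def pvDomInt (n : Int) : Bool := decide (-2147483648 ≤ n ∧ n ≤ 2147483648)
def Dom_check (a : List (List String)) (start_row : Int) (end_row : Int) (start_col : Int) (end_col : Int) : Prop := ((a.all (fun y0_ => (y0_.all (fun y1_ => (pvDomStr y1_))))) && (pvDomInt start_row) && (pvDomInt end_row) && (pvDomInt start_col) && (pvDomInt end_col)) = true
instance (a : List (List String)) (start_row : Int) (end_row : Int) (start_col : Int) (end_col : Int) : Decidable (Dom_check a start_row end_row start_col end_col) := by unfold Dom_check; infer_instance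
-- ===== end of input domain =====

-- B replaces A's reset-counter scans with run extraction (cut positions, then max boundary gap): an alternative decomposition, same cost.

-- ===== PORT A =====
def check (a : List (List String)) (start_row : Int) (end_row : Int) (start_col : Int) (end_col : Int) : Int :=
  let n : Int := (a.length : Int)
  let ans1 : Int :=
    (PySem.List.pyRange start_row (end_row + 1) 1).foldl (fun ans i =>
      ((PySem.List.pyRange 1 n 1).foldl (fun st j =>
        let cnt : Int :=
          if PySem.List.pyGetD (PySem.List.pyGetD a i []) j "" =
             PySem.List.pyGetD (PySem.List.pyGetD a i []) (j - 1) "" then st.1 + 1 else 1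
        (cnt, max st.2 cnt)) ((1 : Int), ans)).2) 1
  (PySem.List.pyRange start_col (end_col + 1) 1).foldl (fun ans j =>
      ((PySem.List.pyRange 1 n 1).foldl (fun st i =>
        let cnt : Int :=
          if PySem.List.pyGetD (PySem.List.pyGetD a i []) j "" =
             PySem.List.pyGetD (PySem.List.pyGetD a (i - 1) []) j "" then st.1 + 1 else 1
        (cnt, max st.2 cnt)) ((1 : Int), ans)).2) ans1

-- ===== PORT B =====
-- helper _longest_run of Source B; the max-default 1 is never used (bounds always has ≥ 2 elements)
def longestRunB (line : List String) : Int :=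
  let cuts : List Int := (PySem.List.pyRange 1 (line.length : Int) 1).filter
      (fun k => decide (PySem.List.pyGetD line k "" ≠ PySem.List.pyGetD line (k - 1) ""))
  let bounds : List Int := 0 :: cuts ++ [(line.length : Int)]
  (PySem.List.max? ((bounds.zip (bounds.drop 1)).map (fun p => p.2 - p.1)) (fun x => x)).getD 1

def check_alt (a : List (List String)) (start_row : Int) (end_row : Int) (start_col : Int) (end_col : Int) : Int :=
  let n : Int := (a.length : Int)
  if n < 2 then 1 else
    let ans1 : Int := (PySem.List.pyRange start_row (end_row + 1) 1).foldl
      (fun ans i => max ans (longestRunB (PySem.List.pyGetD a i []))) 1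
    (PySem.List.pyRange start_col (end_col + 1) 1).foldl
      (fun ans j => max ans (longestRunB ((PySem.List.pyRange 0 n 1).map
        (fun i => PySem.List.pyGetD (PySem.List.pyGetD a i []) j "")))) ans1

-- ===== PRECONDITION & SPEC =====
-- Pre_ excludes (only when n = len(a) ≥ 2, where cells are actually read): when the row range is
-- nonempty, row indices outside [-n, n) (A raises IndexError) and non-square grids — short rows make
-- A raise IndexError, and on rows longer than n A silently ignores the cells past column n-1, an
-- artefact of its fixed n-wide scan that no caller of this n×n-board helper would specify; and when
-- the column range is nonempty, column indices out of range for some row (A raises IndexError).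
def Pre_check (a : List (List String)) (start_row : Int) (end_row : Int) (start_col : Int) (end_col : Int) : Prop :=
  2 ≤ a.length →
    ((start_row ≤ end_row → (∀ row ∈ a, row.length = a.length) ∧
        -(a.length : Int) ≤ start_row ∧ end_row < (a.length : Int)) ∧
     (start_col ≤ end_col → ∀ row ∈ a,
        -(row.length : Int) ≤ start_col ∧ end_col < (row.length : Int)))
instance (a : List (List String)) (start_row : Int) (end_row : Int) (start_col : Int) (end_col : Int) : Decidable (Pre_check a start_row end_row start_col end_col) := by unfold Pre_check; infer_instance

def pvWitness_check : List (List String) × Int × Int × Int × Int := ([["a", "a"], ["b", "a"]], 0, 1, 0, 1)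

def Spec_check (a : List (List String)) (start_row : Int) (end_row : Int) (start_col : Int) (end_col : Int) (out : Int) : Prop := out = check_alt a start_row end_row start_col end_col
instance (a : List (List String)) (start_row : Int) (end_row : Int) (start_col : Int) (end_col : Int) (out : Int) : Decidable (Spec_check a start_row end_row start_col end_col out) := by unfold Spec_check; infer_instance

-- ===== CLAIM (what is proved, stated in full; the proofs are below) =====
def Claim_equal_check : Prop := ∀ (a : List (List String)) (start_row : Int) (end_row : Int) (start_col : Int) (end_col : Int), Dom_check a start_row end_row start_col end_col → Pre_check a start_row end_row start_col end_col → Spec_check a start_row end_row start_col end_col (check a start_row end_row start_col end_col)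

-- ===== LEMMAS AND PROOFS =====

-- structural model of A's inner loop: state (cnt, ans), previous cell p
def runA (p : String) (st : Int × Int) : List String → Int × Int
  | [] => st
  | y :: ys => runA y (if y = p then st.1 + 1 else 1,
      max st.2 (if y = p then st.1 + 1 else 1)) ys

-- run-length decomposition of p :: ys with the current run already of length c
def runsAux (p : String) (c : Int) : List String → List Int
  | [] => [c]
  | y :: ys => if y = p then runsAux y (c + 1) ys else c :: runsAux y 1 ys

-- successive differences
def gaps : List Int → List Int
  | x :: y :: r => (y - x) :: gaps (y :: r)
  | _ => []

theorem runsAux_head (ys : List String) : ∀ (p : String) (c : Int),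
    ∃ d l', runsAux p c ys = d :: l' ∧ c ≤ d := by
  induction ys with
  | nil => intro p c; exact ⟨c, [], rfl, le_refl _⟩
  | cons y ys ih =>
    intro p c
    by_cases h : y = p
    · subst h
      obtain ⟨d, l', he, hle⟩ := ih y (c + 1)
      exact ⟨d, l', by simp [runsAux, he], by omega⟩
    · exact ⟨c, runsAux y 1 ys, by simp [runsAux, h], le_refl _⟩

theorem runA_snd (ys : List String) : ∀ (p : String) (c ans : Int), 1 ≤ c → c ≤ ans →
    (runA p (c, ans) ys).2 = (runsAux p c ys).foldl max ans := by
  induction ys with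
  | nil => intro p c ans h1 h2; simp [runA, runsAux]; omega
  | cons y ys ih =>
    intro p c ans h1 h2
    by_cases h : y = p
    · obtain ⟨d, l', he, hle⟩ := runsAux_head ys y (c + 1)
      have hrec := ih y (c + 1) (max ans (c + 1)) (by omega) (by omega)
      simp only [runA, runsAux, if_pos h]
      rw [hrec, he, List.foldl_cons, List.foldl_cons]
      have hmx : max (max ans (c + 1)) d = max ans d := by omega
      rw [hmx]
    · have hrec := ih y 1 ans (le_refl _) (by omega)
      have hm1 : max ans (1 : Int) = ans := by omega
      have hc : max ans c = ans := by omega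
      simp only [runA, runsAux, if_neg h]
      rw [hm1, hrec, List.foldl_cons, hc]

theorem foldl_max_max (l : List Int) : ∀ (a b : Int),
    l.foldl max (max a b) = max a (l.foldl max b) := by
  induction l with
  | nil => intro a b; rfl
  | cons y l ih =>
    intro a b
    simp only [List.foldl_cons]
    rw [max_assoc, ih]

theorem zip_gaps (l : List Int) :
    ((l.zip (l.drop 1)).map (fun p => p.2 - p.1)) = gaps l := by
  induction l with
  | nil => rfl
  | cons x l ih =>
    cases l with
    | nil => rfl
    | cons y r =>
      simp only [List.drop_succ_cons, List.drop_zero, List.zip_cons_cons, List.map_cons, gaps]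
      have := ih
      simp only [List.drop_succ_cons, List.drop_zero] at this
      rw [this]

theorem innerA_eq_runA (len : Nat) : ∀ (f : Int → String) (m c ans : Int),
    ((PySem.List.pyRange (m + 1) (m + 1 + (len : Int)) 1).foldl (fun st j =>
        ((if f j = f (j - 1) then st.1 + 1 else 1 : Int),
          max st.2 (if f j = f (j - 1) then st.1 + 1 else 1))) (c, ans))
    = runA (f m) (c, ans) ((PySem.List.pyRange (m + 1) (m + 1 + (len : Int)) 1).map f) := by
  induction len with
  | zero =>
    intro f m c ans
    rw [PySem.List.pyRange_one_eq_nil (by omega)]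
    rfl
  | succ len ih =>
    intro f m c ans
    rw [PySem.List.pyRange_one_cons (by omega)]
    have harg : m + 1 + ((len : Int) + 1) = (m + 1) + 1 + (len : Int) := by ring
    simp only [List.foldl_cons, List.map_cons, Nat.cast_add, Nat.cast_one, harg]
    rw [ih f (m + 1)]
    simp only [runA, add_sub_cancel_right]

theorem cuts_gaps (len : Nat) : ∀ (f : Int → String) (m s : Int), s ≤ m →
    gaps (s :: ((PySem.List.pyRange (m + 1) (m + 1 + (len : Int)) 1).filter
        (fun k => decide (f k ≠ f (k - 1)))) ++ [m + 1 + (len : Int)])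
    = runsAux (f m) (m + 1 - s) ((PySem.List.pyRange (m + 1) (m + 1 + (len : Int)) 1).map f) := by
  induction len with
  | zero =>
    intro f m s hs
    rw [PySem.List.pyRange_one_eq_nil (by omega)]
    simp [gaps, runsAux]
  | succ len ih =>
    intro f m s hs
    rw [PySem.List.pyRange_one_cons (by omega)]
    have harg : m + 1 + ((len : Int) + 1) = (m + 1) + 1 + (len : Int) := by ring
    simp only [List.filter_cons, List.map_cons, Nat.cast_add, Nat.cast_one, harg,
      add_sub_cancel_right]
    by_cases h : f (m + 1) = f m
    · simp only [h, ne_eq, not_true_eq_false, decide_false, Bool.false_eq_true, if_neg,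
        if_false]
      rw [ih f (m + 1) s (by omega)]
      simp only [runsAux]
      have h2 : m + 1 + 1 - s = m + 1 - s + 1 := by ring
      rw [h2]
      simp only [if_true, h]
    · simp only [h, ne_eq, not_false_eq_true, decide_true, if_pos, if_true]
      have hstep : gaps ((s :: (m + 1) :: ((PySem.List.pyRange ((m + 1) + 1) ((m + 1) + 1 + (len : Int)) 1).filter
          (fun k => decide (f k ≠ f (k - 1))))) ++ [(m + 1) + 1 + (len : Int)])
          = (m + 1 - s) :: gaps (((m + 1) :: ((PySem.List.pyRange ((m + 1) + 1) ((m + 1) + 1 + (len : Int)) 1).filter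
          (fun k => decide (f k ≠ f (k - 1))))) ++ [(m + 1) + 1 + (len : Int)]) := rfl
      rw [hstep, ih f (m + 1) (m + 1) (le_refl _)]
      have h3 : (m + 1) + 1 - (m + 1) = (1 : Int) := by ring
      rw [h3]
      simp only [runsAux, if_neg h]

-- B's helper, expressed through runsAux and folded into a running max
theorem per_line (line : List String) (ans : Int) (hne : line ≠ []) (h1 : 1 ≤ ans) :
    max ans (longestRunB line)
      = (runsAux (PySem.List.pyGetD line 0 "") 1
          ((PySem.List.pyRange 1 (line.length : Int) 1).map
            (fun j => PySem.List.pyGetD line j ""))).foldl max ans := by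
  obtain ⟨len, hlen⟩ : ∃ len, line.length = len + 1 := by
    cases line with
    | nil => exact absurd rfl hne
    | cons x xs => exact ⟨xs.length, rfl⟩
  have hcast : (line.length : Int) = 1 + (len : Int) := by rw [hlen]; push_cast; ring
  have hg := cuts_gaps len (fun j => PySem.List.pyGetD line j "") 0 0 (le_refl _)
  simp only [zero_add, sub_zero] at hg
  simp only [longestRunB]
  rw [zip_gaps, hcast, hg]
  obtain ⟨d, l', he, hd⟩ := runsAux_head
    ((PySem.List.pyRange 1 (1 + (len : Int)) 1).map (fun j => PySem.List.pyGetD line j ""))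
    (PySem.List.pyGetD line 0 "") 1
  rw [he, PySem.List.max?_id_cons, Option.getD_some, List.foldl_cons, foldl_max_max]

-- the combined outer-loop congruence: fold results are equal and stay ≥ 1
theorem outer_fold (idxs : List Int) (F G : Int → Int → Int)
    (h : ∀ ans i, i ∈ idxs → 1 ≤ ans → F ans i = G ans i ∧ 1 ≤ F ans i) :
    ∀ ans, 1 ≤ ans → idxs.foldl F ans = idxs.foldl G ans ∧ 1 ≤ idxs.foldl F ans := by
  induction idxs with
  | nil => intro ans h1; exact ⟨rfl, h1⟩
  | cons i idxs ih =>
    intro ans h1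
    obtain ⟨heq, hge⟩ := h ans i (List.mem_cons_self ..) h1
    have hrec := ih (fun ans' i' hi' h1' => h ans' i' (List.mem_cons_of_mem _ hi') h1') (F ans i) hge
    simp only [List.foldl_cons]
    rw [← heq]
    exact hrec

theorem foldl_const {α β : Type} (l : List α) (x : β) :
    l.foldl (fun acc _ => acc) x = x := by
  induction l generalizing x with
  | nil => rfl
  | cons y l ih => exact ih x

-- ===== VERDICT (by name: the statement is the Claim_ definition above) =====
theorem check_spec : Claim_equal_check := by
  intro a sr er sc ec _hdom hpre
  unfold Spec_check check check_alt
  by_cases hn : a.length < 2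
  · -- n < 2: every inner range is empty, A's loops leave ans = 1, B returns 1 via its guard
    have hemp : PySem.List.pyRange 1 (a.length : Int) 1 = [] :=
      PySem.List.pyRange_one_eq_nil (by exact_mod_cast Nat.lt_succ_iff.mp hn)
    simp only [hemp, List.foldl_nil, if_pos (by exact_mod_cast hn : ((a.length : Int) < 2))]
    rw [foldl_const, foldl_const]
  · have hn2 : 2 ≤ a.length := by omega
    obtain ⟨hrowPre, hcolPre⟩ := hpre hn2
    rw [if_neg (by exact_mod_cast hn)]
    obtain ⟨len, hlen⟩ : ∃ len, a.length = len + 1 := ⟨a.length - 1, by omega⟩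
    have hcast : (a.length : Int) = 1 + (len : Int) := by rw [hlen]; push_cast; ring
    -- rows
    have hrows := outer_fold (PySem.List.pyRange sr (er + 1) 1)
      (fun ans i => ((PySem.List.pyRange 1 (a.length : Int) 1).foldl (fun st j =>
          ((if PySem.List.pyGetD (PySem.List.pyGetD a i []) j "" =
             PySem.List.pyGetD (PySem.List.pyGetD a i []) (j - 1) "" then st.1 + 1 else 1 : Int),
            max st.2 (if PySem.List.pyGetD (PySem.List.pyGetD a i []) j "" =
             PySem.List.pyGetD (PySem.List.pyGetD a i []) (j - 1) "" then st.1 + 1 else 1))) ((1 : Int), ans)).2)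
      (fun ans i => max ans (longestRunB (PySem.List.pyGetD a i [])))
      (by
        intro ans i hi h1
        rw [PySem.List.mem_pyRange_one] at hi
        obtain ⟨hsq, hb1, hb2⟩ := hrowPre (by omega)
        have hir : -(a.length : Int) ≤ i ∧ i < (a.length : Int) := by omega
        have hmem : PySem.List.pyGetD a i [] ∈ a :=
          PySem.List.pyGetD_mem a [] (by unfold PySem.Raise.InRange; exact hir)
        have hlr : (PySem.List.pyGetD a i []).length = a.length := hsq _ hmem
        have hA := innerA_eq_runA len (fun j => PySem.List.pyGetD (PySem.List.pyGetD a i []) j "") 0 1 ans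
        simp only [zero_add] at hA
        have hB := per_line (PySem.List.pyGetD a i []) ans (by
          intro hnil; rw [hnil] at hlr; simp at hlr; omega) h1
        constructor
        · simp only [hcast]
          rw [hA, runA_snd _ _ _ _ (le_refl _) h1]
          rw [hB]
          rw [hlr, hcast]
        · simp only [hcast]
          rw [hA, runA_snd _ _ _ _ (le_refl _) h1]
          exact le_trans h1 (PySem.List.le_foldl_max _ ans).1)
      1 (le_refl _)
    -- columns
    have hcols := outer_fold (PySem.List.pyRange sc (ec + 1) 1)
      (fun ans j => ((PySem.List.pyRange 1 (a.length : Int) 1).foldl (fun st i =>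
          ((if PySem.List.pyGetD (PySem.List.pyGetD a i []) j "" =
             PySem.List.pyGetD (PySem.List.pyGetD a (i - 1) []) j "" then st.1 + 1 else 1 : Int),
            max st.2 (if PySem.List.pyGetD (PySem.List.pyGetD a i []) j "" =
             PySem.List.pyGetD (PySem.List.pyGetD a (i - 1) []) j "" then st.1 + 1 else 1))) ((1 : Int), ans)).2)
      (fun ans j => max ans (longestRunB ((PySem.List.pyRange 0 (a.length : Int) 1).map
        (fun i => PySem.List.pyGetD (PySem.List.pyGetD a i []) j ""))))
      (by
          intro ans j hj h1
          beta_reduce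
          rw [PySem.List.mem_pyRange_one] at hj
          have hA := innerA_eq_runA len (fun i => PySem.List.pyGetD (PySem.List.pyGetD a i []) j "") 0 1 ans
          simp only [zero_add] at hA
          set colLine : List String := (PySem.List.pyRange 0 (a.length : Int) 1).map
              (fun i => PySem.List.pyGetD (PySem.List.pyGetD a i []) j "") with hcol_def
          have hcl : colLine.length = a.length := by
            simp [hcol_def, PySem.List.length_pyRange_one]
          have hB := per_line colLine ans (by
            intro hnil; rw [hnil] at hcl; simp at hcl; omega) h1
          have hbridge : ∀ (k : Int), 0 ≤ k → k < (a.length : Int) →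
              PySem.List.pyGetD colLine k "" = PySem.List.pyGetD (PySem.List.pyGetD a k []) j "" := by
            intro k hk0 hkn
            rw [hcol_def]
            exact PySem.List.pyGetD_map_pyRange_of_nonneg _ _ _ _ hk0 hkn
          constructor
          · rw [hB, hbridge 0 (le_refl _) (by omega), hcl]
            have hmapeq : (PySem.List.pyRange 1 (a.length : Int) 1).map (fun k => PySem.List.pyGetD colLine k "")
                = (PySem.List.pyRange 1 (a.length : Int) 1).map (fun i => PySem.List.pyGetD (PySem.List.pyGetD a i []) j "") := by
              apply List.map_congr_left
              intro k hk
              rw [PySem.List.mem_pyRange_one] at hk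
              exact hbridge k (by omega) (by omega)
            rw [hmapeq]
            simp only [hcast]
            rw [hA, runA_snd _ _ _ _ (le_refl _) h1]
          · simp only [hcast]
            rw [hA, runA_snd _ _ _ _ (le_refl _) h1]
            exact le_trans h1 (PySem.List.le_foldl_max _ ans).1)
    rw [← hrows.1]
    exact (hcols _ hrows.2).1
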